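-- pv_equiv track=rewrite | github.com/CentreSecuriteIA/textbook | scripts/latex_typography.py | escape_special_chars
-- ===== SOURCE A (Python) =====
-- def is_in_latex_command(text: str, pos: int) -> bool:
--     """Check if the position is inside a LaTeX command."""
--     # Find last command before this position
--     last_command = text.rfind('\\', 0, pos)
--     if last_command == -1:
--         return False
--
--     # Find braces
--     open_brace = text.find('{', last_command)
--     if open_brace == -1 or open_brace > pos:
--         return False
--
--     # Count braces to this position
--     opens = 0
--     closes = 0
--     for i in range(open_brace, pos):
--         if text[i] == '{':
--             opens += 1
--         elif text[i] == '}':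
--             closes += 1
--
--     # If we have more opens than closes, we're in a command
--     return opens > closes
--
-- def escape_special_chars(text: str) -> str:
--     """Escape special characters, but only in regular text."""
--     result = ""
--     i = 0
--     while i < len(text):
--         # Skip if in a LaTeX command
--         if is_in_latex_command(text, i):
--             result += text[i]
--             i += 1
--             continue
--
--         # Handle special characters
--         if text[i] == '&':
--             result += r'\&'
--         else:
--             result += text[i]
--         i += 1
--     return result
-- ===== SOURCE B (Python) =====
-- def escape_special_chars(text: str) -> str:
--     """Escape special characters, but only in regular text.
--
--     Single pass: track whether a backslash has been seen, whether a '{' has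
--     been seen since the last backslash, and the running brace depth since
--     that first '{'.
--     """
--     out = []
--     have_bs = False     # a backslash occurs before the current position
--     have_brace = False  # a '{' occurs at/after the last backslash
--     depth = 0           # '{' minus '}' since that first '{'
--     for ch in text:
--         in_cmd = have_bs and have_brace and depth > 0
--         if ch == '&' and not in_cmd:
--             out.append('\\&')
--         else:
--             out.append(ch)
--         if ch == '\\':
--             have_bs = True
--             have_brace = False
--             depth = 0
--         elif ch == '{':
--             if have_bs:
--                 if have_brace:
--                     depth += 1
--                 else:
--                     have_brace = True
--                     depth = 1
--         elif ch == '}':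
--             if have_brace:
--                 depth -= 1
--     return ''.join(out)
-- ===== Notes on version B (the rewrite author's own statement) =====
-- stated objective: faster
-- what changed: A re-scans the whole prefix at every position (rfind for the last backslash, find for the brace, then recounts braces); B makes a single left-to-right pass carrying three state variables (backslash seen, brace seen since it, running brace depth).
import Mathlib
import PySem

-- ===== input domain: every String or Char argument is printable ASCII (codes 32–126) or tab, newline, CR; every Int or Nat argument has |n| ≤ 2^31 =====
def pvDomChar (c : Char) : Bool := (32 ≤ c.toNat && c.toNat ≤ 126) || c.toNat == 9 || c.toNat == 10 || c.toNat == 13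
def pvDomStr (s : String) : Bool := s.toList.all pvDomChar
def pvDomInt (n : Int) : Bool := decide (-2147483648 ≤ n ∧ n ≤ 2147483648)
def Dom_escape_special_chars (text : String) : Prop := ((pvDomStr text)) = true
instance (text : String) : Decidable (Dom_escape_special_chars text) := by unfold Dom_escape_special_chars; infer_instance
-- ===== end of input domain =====

-- B replaces A's per-position rescans (rfind/find and a brace recount at every index) by one
-- left-to-right pass carrying (backslash seen, brace seen since it, running depth): same output.

-- ===== PORT A =====
def pvIsInLatexCommand (text : String) (pos : Nat) : Bool :=
  -- last_command = text.rfind('\\', 0, pos)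
  let last_command : Int := PySem.Str.rfindFrom text "\\" 0 (some (pos : Int))
  if last_command = -1 then false
  else
    -- open_brace = text.find('{', last_command)
    let open_brace : Int := PySem.Str.findFrom text "{" last_command none
    if open_brace = -1 || decide ((pos : Int) < open_brace) then false
    else
      -- opens/closes counted over range(open_brace, pos)
      let oc := (PySem.List.pyRange open_brace (pos : Int) 1).foldl
        (fun (oc : Int × Int) i =>
          if PySem.Chars.pyGet? text.toList i = some '{' then (oc.1 + 1, oc.2)
          else if PySem.Chars.pyGet? text.toList i = some '}' then (oc.1, oc.2 + 1)
          else oc) (0, 0)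
      decide (oc.2 < oc.1)

def escape_special_chars (text : String) : String :=
  let l := text.toList
  String.ofList ((List.range l.length).foldl
    (fun (res : List Char) i =>
      if pvIsInLatexCommand text i then res ++ [l.getD i ' ']
      else if l.getD i ' ' = '&' then res ++ ['\\', '&']
      else res ++ [l.getD i ' ']) [])

-- ===== PORT B =====
def pvAltStep (st : List Char × Bool × Bool × Int) (ch : Char) :
    List Char × Bool × Bool × Int :=
  match st with
  | (out, bs, br, d) =>
    let inCmd := bs && br && decide (0 < d)
    let out' := if ch = '&' && !inCmd then out ++ ['\\', '&'] else out ++ [ch]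
    if ch = '\\' then (out', true, false, 0)
    else if ch = '{' then
      if bs then (if br then (out', bs, br, d + 1) else (out', bs, true, 1))
      else (out', bs, br, d)
    else if ch = '}' then
      if br then (out', bs, br, d - 1) else (out', bs, br, d)
    else (out', bs, br, d)

def escape_special_chars_alt (text : String) : String :=
  String.ofList (text.toList.foldl pvAltStep ([], false, false, 0)).1


-- ===== PRECONDITION & SPEC =====
def Spec_escape_special_chars (text : String) (out : String) : Prop := out = escape_special_chars_alt text
instance (text : String) (out : String) : Decidable (Spec_escape_special_chars text out) := by unfold Spec_escape_special_chars; infer_instance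

-- ===== CLAIM (what is proved, stated in full; the proofs are below) =====
def Claim_equal_escape_special_chars : Prop := ∀ (text : String), Dom_escape_special_chars text → Spec_escape_special_chars text (escape_special_chars text)

-- ===== LEMMAS AND PROOFS =====

def pvSufBS (c0 : Char) : List Char → Option (List Char)
  | [] => none
  | c :: rest =>
    match pvSufBS c0 rest with
    | some s => some s
    | none => if c = c0 then some rest else none

def pvSufBr (c0 : Char) : List Char → Option (List Char)
  | [] => none
  | c :: rest => if c = c0 then some (c :: rest) else pvSufBr c0 rest

lemma pvSufBS_append_singleton (c0 c : Char) (p : List Char) :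
    pvSufBS c0 (p ++ [c]) =
      if c = c0 then some [] else (pvSufBS c0 p).map (· ++ [c]) := by
  induction p with
  | nil => simp [pvSufBS]
  | cons a rest ih =>
    simp only [List.cons_append, pvSufBS, ih]
    by_cases hc : c = c0 <;> simp [hc]
    cases h : pvSufBS c0 rest <;> simp

lemma pvSufBr_append_singleton (c0 c : Char) (s : List Char) :
    pvSufBr c0 (s ++ [c]) =
      match pvSufBr c0 s with
      | some t => some (t ++ [c])
      | none => if c = c0 then some [c] else none := by
  induction s with
  | nil => simp [pvSufBr]
  | cons a rest ih =>
    simp only [List.cons_append, pvSufBr, ih]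
    by_cases ha : a = c0 <;> simp [ha]

def pvUpd (st : Bool × Bool × Int) (ch : Char) : Bool × Bool × Int :=
  match st with
  | (bs, br, d) =>
    if ch = '\\' then (true, false, 0)
    else if ch = '{' then
      if bs then (if br then (bs, br, d + 1) else (bs, true, 1)) else (bs, br, d)
    else if ch = '}' then
      if br then (bs, br, d - 1) else (bs, br, d)
    else (bs, br, d)

def pvPhi (p : List Char) : Bool × Bool × Int :=
  match pvSufBS '\\' p with
  | none => (false, false, 0)
  | some s =>
    match pvSufBr '{' s with
    | none => (true, false, 0)
    | some t => (true, true, (t.count '{' : Int) - (t.count '}' : Int))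

lemma pvPhi_append_singleton (p : List Char) (c : Char) :
    pvPhi (p ++ [c]) = pvUpd (pvPhi p) c := by
  simp only [pvPhi, pvSufBS_append_singleton]
  by_cases hbs : c = '\\'
  · simp [hbs, pvUpd, pvSufBr]
  · simp only [hbs, if_false]
    cases h : pvSufBS '\\' p with
    | none => simp [pvUpd, hbs]
    | some s =>
      simp only [Option.map_some, pvSufBr_append_singleton]
      cases h2 : pvSufBr '{' s with
      | none =>
        by_cases hbr : c = '{'
        · simp [hbr, pvUpd]
        · simp [hbr, pvUpd, hbs]
      | some t =>
        by_cases hbr : c = '{'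
        · simp [hbr, pvUpd]
          ring
        · by_cases hcl : c = '}'
          · simp [hcl, pvUpd]
            ring
          · simp [pvUpd, hbs, hbr, hcl]

def pvDec (st : Bool × Bool × Int) : Bool := st.1 && st.2.1 && decide (0 < st.2.2)

def pvEmit (st : Bool × Bool × Int) (ch : Char) : List Char :=
  if ch = '&' && !pvDec st then ['\\', '&'] else [ch]

lemma pvAltStep_eq (out : List Char) (st : Bool × Bool × Int) (ch : Char) :
    pvAltStep (out, st) ch = (out ++ pvEmit st ch, pvUpd st ch) := by
  rcases st with ⟨bs, br, d⟩
  simp only [pvAltStep, pvEmit, pvUpd, pvDec]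
  split_ifs <;> rfl

def pvBOut (st : Bool × Bool × Int) : List Char → List Char
  | [] => []
  | c :: rest => pvEmit st c ++ pvBOut (pvUpd st c) rest

lemma pvFoldl_altStep (p : List Char) (out : List Char) (st : Bool × Bool × Int) :
    (p.foldl pvAltStep (out, st)).1 = out ++ pvBOut st p := by
  induction p generalizing out st with
  | nil => simp [pvBOut]
  | cons c rest ih =>
    simp only [List.foldl_cons, pvAltStep_eq, pvBOut, ih, List.append_assoc]

lemma pvFoldl_out {α β : Type} (g : β → List α) (xs : List β) (init : List α) :
    xs.foldl (fun res i => res ++ g i) init = init ++ xs.foldl (fun res i => res ++ g i) [] := by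
  induction xs generalizing init with
  | nil => simp
  | cons x xs ih => rw [List.foldl_cons, List.foldl_cons, ih, List.nil_append, ih (g x), List.append_assoc]

lemma pvBOut_phi (q p : List Char) :
    pvBOut (pvPhi q) p =
      (List.range p.length).foldl
        (fun res i => res ++ pvEmit (pvPhi (q ++ p.take i)) (p.getD i ' ')) [] := by
  induction p generalizing q with
  | nil => simp [pvBOut]
  | cons c rest ih =>
    have h1 : pvUpd (pvPhi q) c = pvPhi (q ++ [c]) := (pvPhi_append_singleton q c).symm
    simp only [pvBOut, h1, ih (q ++ [c])]
    rw [List.length_cons, List.range_succ_eq_map]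
    simp only [List.foldl_cons, List.foldl_map]
    rw [List.nil_append, List.take_zero, List.append_nil, List.getD_cons_zero]
    have heq : ∀ i, (q ++ (c :: rest).take (i+1)) = ((q ++ [c]) ++ rest.take i) := by
      intro i; simp
    simp only [heq, List.getD_cons_succ]
    exact (pvFoldl_out _ _ _).symm

lemma pvRfindGo_zero (s sub : List Char) :
    PySem.Chars.rfind.go s sub 0 = if sub.isPrefixOf s then 0 else -1 := by
  simp [PySem.Chars.rfind.go]

lemma pvRfindGo_succ (s sub : List Char) (j : Nat) :
    PySem.Chars.rfind.go s sub (j+1) =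
      if sub.isPrefixOf (s.drop (j+1)) then ((j:Int)+1) else PySem.Chars.rfind.go s sub j := by
  simp [PySem.Chars.rfind.go]

lemma pvRfindGo_append (p : List Char) (c ch : Char) :
    ∀ x, x < p.length →
      PySem.Chars.rfind.go (p ++ [c]) [ch] x = PySem.Chars.rfind.go p [ch] x := by
  intro x
  induction x with
  | zero =>
    intro h
    rw [pvRfindGo_zero, pvRfindGo_zero]
    cases p with
    | nil => simp at h
    | cons a t => simp [List.isPrefixOf]
  | succ j ih =>
    intro h
    rw [pvRfindGo_succ, pvRfindGo_succ]
    rw [List.drop_append_of_le_length (by omega)]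
    rw [List.drop_eq_getElem_cons (by omega : j+1 < p.length)]
    simp only [List.isPrefixOf, List.cons_append]
    rw [ih (by omega)]
    simp

lemma pvRfind_append_singleton (p : List Char) (c ch : Char) :
    PySem.Chars.rfind (p ++ [c]) [ch] =
      if c = ch then (p.length : Int) else PySem.Chars.rfind p [ch] := by
  show PySem.Chars.rfind.go _ _ (p ++ [c]).length = _
  have hl : (p ++ [c]).length = p.length + 1 := by simp
  rw [hl, pvRfindGo_succ]
  have h0 : List.drop (p.length + 1) (p ++ [c]) = [] := by simp
  rw [h0]
  have hpre : ([ch].isPrefixOf ([] : List Char)) = false := rfl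
  rw [hpre]
  simp only [Bool.false_eq_true, if_false]
  have hsingle : ([ch].isPrefixOf [c]) = (ch == c) := by simp [List.isPrefixOf]
  by_cases hc : c = ch
  · subst hc
    cases p with
    | nil =>
      simp only [List.nil_append, List.length_nil]
      rw [pvRfindGo_zero]
      simp [List.isPrefixOf]
    | cons a t =>
      rw [show (a :: t).length = t.length + 1 from rfl, pvRfindGo_succ]
      have : List.drop (t.length + 1) ((a :: t) ++ [c]) = [c] := by
        rw [show t.length + 1 = (a :: t).length from rfl, List.drop_append_of_le_length (le_refl _)]
        simp
      rw [this, hsingle]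
      simp
  · cases p with
    | nil =>
      simp only [List.nil_append, List.length_nil]
      rw [pvRfindGo_zero]
      simp only [PySem.Chars.rfind, List.length_nil]
      rw [pvRfindGo_zero, hsingle]
      have : (ch == c) = false := by simp [Ne.symm hc]
      rw [this]
      simp [hc, hpre]
    | cons a t =>
      rw [show (a :: t).length = t.length + 1 from rfl, pvRfindGo_succ]
      have h2 : List.drop (t.length + 1) ((a :: t) ++ [c]) = [c] := by
        rw [show t.length + 1 = (a :: t).length from rfl, List.drop_append_of_le_length (le_refl _)]
        simp
      rw [h2, hsingle]
      have : (ch == c) = false := by simp [Ne.symm hc]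
      rw [this]
      simp only [Bool.false_eq_true, if_false]
      rw [pvRfindGo_append (a :: t) c ch t.length (by simp)]
      simp only [PySem.Chars.rfind]
      rw [show (a :: t).length = t.length + 1 from rfl, pvRfindGo_succ]
      have h3 : List.drop (t.length + 1) (a :: t) = [] := by simp
      rw [h3, hpre]
      simp [hc]

lemma pvRfind_nil (ch : Char) : PySem.Chars.rfind [] [ch] = -1 := by
  simp only [PySem.Chars.rfind, List.length_nil]
  rw [pvRfindGo_zero]
  rfl

lemma pvRfind_single (c0 : Char) (p : List Char) :
    (PySem.Chars.rfind p [c0] = -1 ∧ pvSufBS c0 p = none) ∨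
    (∃ j : Nat, PySem.Chars.rfind p [c0] = (j : Int) ∧ j < p.length ∧
      p.getD j ' ' = c0 ∧ pvSufBS c0 p = some (p.drop (j + 1))) := by
  induction p using List.reverseRecOn with
  | nil => left; exact ⟨pvRfind_nil c0, rfl⟩
  | append_singleton p c ih =>
    rw [pvRfind_append_singleton, pvSufBS_append_singleton]
    by_cases hc : c = c0
    · right
      refine ⟨p.length, by simp [hc], by simp, ?_, ?_⟩
      · simp [hc]
      · simp [hc, List.drop_eq_nil_of_le]
    · rcases ih with ⟨h1, h2⟩ | ⟨j, h1, h2, h3, h4⟩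
      · left
        simp [hc, h1, h2]
      · right
        refine ⟨j, by simp [hc, h1], by simp; omega, ?_, ?_⟩
        · rw [List.getD_append _ _ _ _ h2]; exact h3
        · simp [hc, h4, List.drop_append_of_le_length (by omega : j + 1 ≤ p.length)]

lemma pvFindGo_nil (sub : List Char) (k : Nat) :
    PySem.Chars.find.go sub [] k = if sub.isEmpty then (k : Int) else -1 := by
  simp [PySem.Chars.find.go]

lemma pvFindGo_cons (sub : List Char) (h : Char) (t : List Char) (k : Nat) :
    PySem.Chars.find.go sub (h :: t) k =
      if sub.isPrefixOf (h :: t) then (k : Int) else PySem.Chars.find.go sub t (k + 1) := by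
  simp [PySem.Chars.find.go]

lemma pvFindGo_offset (c0 : Char) (s : List Char) (k : Nat) :
    PySem.Chars.find.go [c0] s k =
      if PySem.Chars.find.go [c0] s 0 = -1 then -1 else PySem.Chars.find.go [c0] s 0 + k := by
  induction s generalizing k with
  | nil => rw [pvFindGo_nil, pvFindGo_nil]; rfl
  | cons h t ih =>
    rw [pvFindGo_cons, pvFindGo_cons]
    by_cases hp : [c0].isPrefixOf (h :: t)
    · simp [hp]
    · simp only [hp, Bool.false_eq_true, if_false]
      rw [ih (k + 1), ih 1]
      by_cases h2 : PySem.Chars.find.go [c0] t 0 = -1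
      · simp [h2]
      · simp only [h2, if_false]
        have hge := PySem.Chars.neg_one_le_find t [c0]
        simp only [PySem.Chars.find] at hge
        split_ifs with h3
        · exfalso; push_cast at h3; omega
        · push_cast; ring

lemma pvFind_cons (x : Char) (l : List Char) (c0 : Char) :
    PySem.Chars.find (x :: l) [c0] =
      if x = c0 then 0
      else if PySem.Chars.find l [c0] = -1 then -1 else PySem.Chars.find l [c0] + 1 := by
  simp only [PySem.Chars.find]
  rw [pvFindGo_cons]
  have hpre : ([c0].isPrefixOf (x :: l)) = (c0 == x) := by simp [List.isPrefixOf]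
  rw [hpre, pvFindGo_offset]
  by_cases hx : x = c0
  · simp [hx]
  · have : (c0 == x) = false := by simp [Ne.symm hx]
    rw [this]
    simp [hx]

lemma pvFind_append (c0 : Char) (s rest : List Char) :
    (pvSufBr c0 s = none ∧
      (PySem.Chars.find (s ++ rest) [c0] = -1 ∨ (s.length : Int) ≤ PySem.Chars.find (s ++ rest) [c0])) ∨
    (∃ k : Nat, k < s.length ∧ PySem.Chars.find (s ++ rest) [c0] = (k : Int) ∧
      pvSufBr c0 s = some (s.drop k)) := by
  induction s with
  | nil =>
    left
    refine ⟨rfl, ?_⟩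
    have := PySem.Chars.neg_one_le_find rest [c0]
    simp only [List.nil_append, List.length_nil]
    omega
  | cons x s' ih =>
    rw [List.cons_append, pvFind_cons]
    by_cases hx : x = c0
    · right
      exact ⟨0, by simp, by simp [hx], by simp [pvSufBr, hx]⟩
    · simp only [hx, if_false]
      rcases ih with ⟨hn, hf⟩ | ⟨k, hk, hf, hs⟩
      · left
        refine ⟨by simp [pvSufBr, hx, hn], ?_⟩
        rcases hf with hf | hf
        · left; simp [hf]
        · right
          have : ¬ (PySem.Chars.find (s' ++ rest) [c0] = -1) := by omega
          rw [if_neg this]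
          simp only [List.length_cons]
          push_cast
          omega
      · right
        refine ⟨k + 1, by simp; omega, ?_, ?_⟩
        · rw [hf]
          have : ¬ ((k : Int) = -1) := by omega
          rw [if_neg this]
          push_cast; ring
        · simp [pvSufBr, hx, hs]

lemma pvCount_loop (l : List Char) (a b : Nat) (hab : a ≤ b) (hb : b ≤ l.length) :
    (PySem.List.pyRange (a : Int) (b : Int) 1).foldl
      (fun (oc : Int × Int) i =>
        if PySem.Chars.pyGet? l i = some '{' then (oc.1 + 1, oc.2)
        else if PySem.Chars.pyGet? l i = some '}' then (oc.1, oc.2 + 1)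
        else oc) (0, 0)
    = ((((l.take b).drop a).count '{' : Int), (((l.take b).drop a).count '}' : Int)) := by
  induction b with
  | zero =>
    have ha : a = 0 := by omega
    subst ha
    rw [PySem.List.pyRange_one_eq_nil (le_refl _)]
    simp
  | succ b ih =>
    by_cases h : a = b + 1
    · subst h
      rw [PySem.List.pyRange_one_eq_nil (le_refl _)]
      simp
    · have hab' : a ≤ b := by omega
      have hb' : b ≤ l.length := by omega
      have hsplit : PySem.List.pyRange (a : Int) ((b:Int) + 1) 1
          = PySem.List.pyRange (a : Int) (b : Int) 1 ++ PySem.List.pyRange (b : Int) ((b:Int)+1) 1 :=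
        PySem.List.pyRange_one_append _ _ _ (by exact_mod_cast hab') (by omega)
      have hone : PySem.List.pyRange (b : Int) ((b:Int)+1) 1 = [(b:Int)] := by
        rw [PySem.List.pyRange_one_cons (by omega)]
        rw [PySem.List.pyRange_one_eq_nil (by omega)]
      push_cast
      rw [hsplit, hone, List.foldl_append, ih hab' hb']
      have hblt : b < l.length := by omega
      have hget : PySem.Chars.pyGet? l (b : Int) = some (l[b]) := by
        show PySem.List.pyGet? l (b:Int) = _
        rw [PySem.List.pyGet?_natCast]
        rw [List.getElem?_eq_getElem hblt]
      have hslice : (l.take (b+1)).drop a = ((l.take b).drop a) ++ [l[b]] := by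
        rw [List.take_add_one, List.getElem?_eq_getElem hblt]
        rw [List.drop_append_of_le_length (by simp; omega)]
        rfl
      rw [hslice]
      simp only [List.foldl_cons, List.foldl_nil, hget, List.count_append]
      by_cases h1 : l[b] = '{'
      · simp [h1]
      · by_cases h2 : l[b] = '}'
        · simp [h2]
        · simp [h1, h2]

lemma pvRfindFrom_take (text : String) (pos : Nat) (h : pos ≤ text.toList.length) :
    PySem.Str.rfindFrom text "\\" 0 (some (pos:Int)) = PySem.Chars.rfind (text.toList.take pos) ['\\'] := by
  rw [PySem.Str.rfindFrom_eq]
  show PySem.Chars.rfindFrom _ _ _ _ = _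
  simp only [PySem.Chars.rfindFrom]
  have h1 : ¬ ((text.toList.length : Int) < (pos : Int)) := by exact_mod_cast not_lt.mpr h
  have h2 : ¬ ((pos : Int) < 0) := by omega
  simp only [h1, h2, if_false]
  have h3 : ¬ ((0:Int) < 0) := by omega
  norm_num
  have h5 : ("\\".toList) = ['\\'] := rfl
  rw [h5, if_neg h2]
  by_cases hr : PySem.Chars.rfind (text.toList.take pos) ['\\'] = -1 <;> simp [hr]

lemma pvDecision_eq (text : String) (pos : Nat) (hpos : pos < text.toList.length) :
    pvIsInLatexCommand text pos = pvDec (pvPhi (text.toList.take pos)) := by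
  have hle : pos ≤ text.toList.length := le_of_lt hpos
  set l := text.toList with hl
  set p := l.take pos with hp
  have hplen : p.length = pos := by simp [hp, hle]
  rw [pvIsInLatexCommand]
  simp only [← hl]
  simp only [pvRfindFrom_take text pos hle]
  rcases pvRfind_single '\\' p with ⟨h1, h2⟩ | ⟨j, h1, h2, h3, h4⟩
  · rw [← hp, h1, if_pos rfl]
    have hphi : pvPhi p = (false, false, 0) := by
      rw [pvPhi, h2]
    rw [hphi]
    rfl
  · rw [← hp, h1]
    rw [if_neg (by omega : ¬ ((j:Int) = -1))]
    have hjpos : j < pos := by omega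
    have hjlen : j ≤ l.length := by omega
    -- reduce findFrom
    have hfindFrom : PySem.Str.findFrom text "{" (j : Int) none =
        if PySem.Chars.find (l.drop j) ['{'] = -1 then -1
        else (j:Int) + PySem.Chars.find (l.drop j) ['{'] := by
      rw [PySem.Str.findFrom_eq]
      exact PySem.Chars.findFrom_natCast _ _ _ hjlen
    rw [hfindFrom]
    -- the character at the backslash position
    have hgj : l.getD j ' ' = '\\' := by
      rw [← h3, hp, List.getD_eq_getElem _ _ h2, List.getD_eq_getElem _ _ (by omega)]
      exact (List.getElem_take).symm
    have hdropj : l.drop j = '\\' :: l.drop (j+1) := by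
      rw [List.drop_eq_getElem_cons (by omega : j < l.length)]
      congr 1
      rw [← List.getD_eq_getElem _ ' ' (by omega)]
      exact hgj
    rw [hdropj, pvFind_cons]
    rw [if_neg (by decide : ¬ ('\\' = '{'))]
    -- split the tail after the backslash at pos
    have hsplitl : l.drop (j+1) = (p.drop (j+1)) ++ l.drop pos := by
      conv_lhs => rw [← List.take_append_drop pos l]
      rw [List.drop_append]
      rw [show (j + 1 - (l.take pos).length) = 0 from by simp [hle]; omega]
      simp [hp]
    have hslen : (p.drop (j+1)).length = pos - (j+1) := by simp [hplen]
    rcases pvFind_append '{' (p.drop (j+1)) (l.drop pos) with ⟨hn, hfr⟩ | ⟨k, hk, hf, hs⟩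
    · -- no brace between the last backslash and pos
      have hphi : pvPhi p = (true, false, 0) := by
        rw [pvPhi, h4]
        simp [hn]
      rw [hphi]
      rcases hfr with hfr | hfr
      · rw [hsplitl, hfr]
        simp [pvDec]
      · rw [hsplitl]
        set f := PySem.Chars.find (p.drop (j+1) ++ l.drop pos) ['{'] with hfdef
        rw [hslen] at hfr
        have hfge : ((pos - (j+1) : Nat) : Int) ≤ f := hfr
        have hfge' : (pos : Int) - (j:Int) - 1 ≤ f := by omega
        have hF : (if f = -1 then (-1:Int) else f + 1) = f + 1 := if_neg (by omega)
        rw [hF]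
        rw [if_neg (by omega : ¬ ((f:Int) + 1 = -1))]
        by_cases hgt : (pos : Int) < (j:Int) + (f + 1)
        · have hcond : (decide ((j:Int) + (f + 1) = -1) || decide ((pos:Int) < (j:Int) + (f + 1))) = true := by
            simp [hgt]
          rw [hcond, if_pos rfl]
          rfl
        · have hobeq : (j:Int) + (f + 1) = (pos:Int) := by omega
          rw [hobeq]
          have hcond : (decide ((pos:Int) = -1) || decide ((pos:Int) < (pos:Int))) = false := by
            simp
          rw [hcond]
          simp only [Bool.false_eq_true, if_false]
          rw [PySem.List.pyRange_one_eq_nil (le_refl _)]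
          simp [pvDec]
    · -- first brace after the backslash at offset k before pos
      have hphi : pvPhi p = (true, true,
          ((p.drop (j+1+k)).count '{' : Int) - ((p.drop (j+1+k)).count '}' : Int)) := by
        rw [pvPhi, h4]
        simp [hs, List.drop_drop]
      rw [hphi, hsplitl, hf]
      rw [if_neg (by omega : ¬ ((k:Int) = -1))]
      rw [if_neg (by omega : ¬ ((k:Int) + 1 = -1))]
      have hoblt : j + 1 + k < pos := by omega
      have hob : (j:Int) + ((k:Int) + 1) = ((j+1+k : Nat) : Int) := by push_cast; ring
      rw [hob]
      have hcond : (decide (((j+1+k : Nat) : Int) = -1) || decide ((pos:Int) < ((j+1+k : Nat) : Int))) = false := by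
        simp
        omega
      rw [hcond]
      simp only [Bool.false_eq_true, if_false]
      rw [pvCount_loop l (j+1+k) pos (by omega) (by omega)]
      rw [show ((p.drop (j+1+k)) : List Char) = (l.take pos).drop (j+1+k) from by rw [hp]]
      simp only [pvDec, Bool.true_and]
      rw [decide_eq_decide]
      constructor <;> intro hh <;> omega

theorem pv_main (text : String) :
    escape_special_chars text = escape_special_chars_alt text := by
  rw [escape_special_chars, escape_special_chars_alt]
  congr 1
  rw [pvFoldl_altStep]
  rw [show ((false, false, 0) : Bool × Bool × Int) = pvPhi [] from rfl]
  rw [pvBOut_phi [] text.toList]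
  simp only [List.nil_append, List.nil_append]
  refine (PySem.List.foldl_congr_mem _ _ _ _ ?_).symm
  intro res i hi
  have hlt : i < text.toList.length := List.mem_range.mp hi
  rw [pvDecision_eq text i hlt]
  set ch := text.toList.getD i ' ' with hch
  rw [pvEmit]
  set b := pvDec (pvPhi (text.toList.take i)) with hb
  by_cases hB : b = true
  · rw [if_pos hB, hB]
    simp
  · have hB' : b = false := by revert hB; cases b <;> simp
    rw [hB']
    simp only [Bool.false_eq_true, if_false]
    by_cases hamp : ch = '&'
    · rw [if_pos hamp]
      simp [hamp]
    · rw [if_neg hamp]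
      simp [hamp]

-- ===== VERDICT (by name: the statement is the Claim_ definition above) =====
theorem escape_special_chars_spec : Claim_equal_escape_special_chars := by
  intro text _
  show _ = _
  exact pv_main text
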